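-- pv_equiv track=rewrite | github.com/CN-28/Algorithms-and-Data-Structures | Dynamic programming and greedy algorithms/tower.py | tower
-- ===== SOURCE A (Python) =====
-- def tower(A):
--     n = len(A)
--     F = [1 for _ in range(n)]
--
--
--     for i in range(1, n):
--         for j in range(i):
--             if A[i][0] >= A[j][0] and A[i][1] <= A[j][1]:
--                 if F[j] + 1 > F[i]:
--                     F[i] = F[j] + 1
--
--
--     return max(F)
-- ===== SOURCE B (Python) =====
-- def tower(A):
--     best = 0
--     state = []  # Pareto frontier of (x, y, length): entries no other kept entry dominates
--     for row in A:
--         x, y = row[0], row[1]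
--         q = 0
--         for (u, v, l) in state:
--             if x >= u and y <= v and l > q:
--                 q = l
--         c = q + 1
--         if c > best:
--             best = c
--         if not any(u <= x and v >= y and l >= c for (u, v, l) in state):
--             state = [(u, v, l) for (u, v, l) in state
--                      if not (x <= u and y >= v and c >= l)] + [(x, y, c)]
--     return best
-- ===== Notes on version B (the rewrite author's own statement) =====
-- stated objective: alternative
-- what changed: Instead of the index-based quadratic DP array F scanned over all earlier elements, B folds once over the rows maintaining a pruned Pareto frontier of (x, y, chain-length) triples (entries dominated by a newer entry are discarded, dominated new entries are never inserted) plus a running maximum, so the inner scan runs over the frontier only.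
-- outside the precondition, e.g. on tower([[]]): A returns 1, B raises IndexError; on tower([[0], [-1]]): A returns 1, B raises IndexError
import Mathlib
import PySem

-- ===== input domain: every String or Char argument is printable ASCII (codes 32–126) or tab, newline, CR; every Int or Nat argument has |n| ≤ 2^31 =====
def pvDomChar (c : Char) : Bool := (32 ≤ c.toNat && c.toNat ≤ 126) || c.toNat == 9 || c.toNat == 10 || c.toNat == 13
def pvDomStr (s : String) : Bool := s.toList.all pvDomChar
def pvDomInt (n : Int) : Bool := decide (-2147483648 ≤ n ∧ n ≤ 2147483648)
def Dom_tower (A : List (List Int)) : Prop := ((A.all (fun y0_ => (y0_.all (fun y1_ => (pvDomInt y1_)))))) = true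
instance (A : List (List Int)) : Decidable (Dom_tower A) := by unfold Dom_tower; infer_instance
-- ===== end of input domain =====

-- B replaces A's quadratic DP array with a single fold maintaining a pruned Pareto frontier of
-- (x, y, chain-length) triples plus a running maximum; return values proved equal on Pre_tower.

-- ===== PORT A =====
def tower (A : List (List Int)) : Int :=
  let n : Int := (A.length : Int)
  let F0 : List Int := (PySem.List.pyRange 0 n 1).map (fun _ => (1 : Int))
  let F1 := (PySem.List.pyRange 1 n 1).foldl (fun F i =>
    (PySem.List.pyRange 0 i 1).foldl (fun F j =>
      if PySem.List.pyGetD (PySem.List.pyGetD A i []) 0 0 ≥ PySem.List.pyGetD (PySem.List.pyGetD A j []) 0 0 ∧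
         PySem.List.pyGetD (PySem.List.pyGetD A i []) 1 0 ≤ PySem.List.pyGetD (PySem.List.pyGetD A j []) 1 0 then
        (if PySem.List.pyGetD F j 0 + 1 > PySem.List.pyGetD F i 0 then
          PySem.List.pySetD F i (PySem.List.pyGetD F j 0 + 1)
        else F)
      else F) F) F0
  (PySem.List.max? F1 (fun v => v)).getD 0

-- ===== PORT B =====
-- inner scan of Source B: best chain length among frontier entries (u,v,l) with x ≥ u and y ≤ v
def towerQ (state : List (Int × Int × Int)) (x y : Int) : Int :=
  state.foldl (fun q e => if x ≥ e.1 ∧ y ≤ e.2.1 ∧ e.2.2 > q then e.2.2 else q) 0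

-- one iteration of Source B's loop body: query, update best, prune-and-insert
def towerStep (s : Int × List (Int × Int × Int)) (row : List Int) : Int × List (Int × Int × Int) :=
  let x := PySem.List.pyGetD row 0 0
  let y := PySem.List.pyGetD row 1 0
  let c := towerQ s.2 x y + 1
  let best := if c > s.1 then c else s.1
  let state := if s.2.any (fun e => decide (e.1 ≤ x ∧ e.2.1 ≥ y ∧ e.2.2 ≥ c)) then s.2
      else (s.2.filter (fun e => decide (¬ (x ≤ e.1 ∧ y ≥ e.2.1 ∧ c ≥ e.2.2)))) ++ [(x, y, c)]
  (best, state)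

def tower_alt (A : List (List Int)) : Int := (A.foldl towerStep (0, [])).1

-- ===== PRECONDITION & SPEC =====
-- Pre_ excludes the inputs on which A raises (empty list: ValueError from max; a row reached with
-- fewer than 2 entries: IndexError); it also excludes inputs with a row shorter than 2 entries on
-- which A happens to return only because short-circuit evaluation (or n = 1) never indexes that
-- row — B reads the first two entries of every row.
def Pre_tower (A : List (List Int)) : Prop := A ≠ [] ∧ ∀ r ∈ A, 2 ≤ r.length
instance (A : List (List Int)) : Decidable (Pre_tower A) := by unfold Pre_tower; infer_instance

def pvWitness_tower : List (List Int) := [[0, 3], [1, 2], [1, 1]]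

def Spec_tower (A : List (List Int)) (out : Int) : Prop := out = tower_alt A
instance (A : List (List Int)) (out : Int) : Decidable (Spec_tower A out) := by unfold Spec_tower; infer_instance

-- ===== CLAIM (what is proved, stated in full; the proofs are below) =====
def Claim_equal_tower : Prop := ∀ (A : List (List Int)), Dom_tower A → Pre_tower A → Spec_tower A (tower A)

-- ===== LEMMAS AND PROOFS =====

-- the step function of towerQ's fold
def qstep (x y : Int) (q : Int) (e : Int × Int × Int) : Int :=
  if x ≥ e.1 ∧ y ≤ e.2.1 ∧ e.2.2 > q then e.2.2 else q

theorem towerQ_eq (S : List (Int × Int × Int)) (x y : Int) :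
    towerQ S x y = S.foldl (qstep x y) 0 := rfl

theorem qstep_ge (x y q : Int) (e : Int × Int × Int) : q ≤ qstep x y q e := by
  unfold qstep; split <;> omega

theorem foldq_ge (x y : Int) : ∀ (S : List (Int × Int × Int)) (q : Int),
    q ≤ S.foldl (qstep x y) q
  | [], _ => le_refl _
  | e :: S, q => le_trans (qstep_ge x y q e) (foldq_ge x y S _)

theorem foldq_mem_le (x y : Int) (S : List (Int × Int × Int)) (q : Int)
    (e : Int × Int × Int) (he : e ∈ S) (h1 : x ≥ e.1) (h2 : y ≤ e.2.1) :
    e.2.2 ≤ S.foldl (qstep x y) q := by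
  induction S generalizing q with
  | nil => cases he
  | cons f S ih =>
    rcases List.mem_cons.mp he with rfl | hm
    · refine le_trans ?_ (foldq_ge x y S (qstep x y q e))
      unfold qstep; split <;> omega
    · exact ih _ hm

theorem foldq_cases (x y : Int) (S : List (Int × Int × Int)) : ∀ q : Int,
    S.foldl (qstep x y) q = q ∨
      ∃ e ∈ S, (x ≥ e.1 ∧ y ≤ e.2.1) ∧ S.foldl (qstep x y) q = e.2.2 := by
  induction S with
  | nil => intro q; exact Or.inl rfl
  | cons f S ih =>
    intro q
    rcases ih (qstep x y q f) with h | ⟨e, he, hc, hv⟩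
    · by_cases hcond : x ≥ f.1 ∧ y ≤ f.2.1 ∧ f.2.2 > q
      · refine Or.inr ⟨f, List.mem_cons_self, ⟨hcond.1, hcond.2.1⟩, ?_⟩
        show S.foldl (qstep x y) (qstep x y q f) = f.2.2
        rw [h]; unfold qstep; rw [if_pos hcond]
      · refine Or.inl ?_
        show S.foldl (qstep x y) (qstep x y q f) = q
        rw [h]; unfold qstep; rw [if_neg hcond]
    · exact Or.inr ⟨e, List.mem_cons_of_mem _ he, hc, hv⟩

theorem towerQ_nonneg (S : List (Int × Int × Int)) (x y : Int) : 0 ≤ towerQ S x y := by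
  rw [towerQ_eq]; exact foldq_ge x y S 0

theorem towerQ_le_of_cover (x y : Int) (S S' : List (Int × Int × Int))
    (h : ∀ e ∈ S, x ≥ e.1 → y ≤ e.2.1 →
        ∃ e' ∈ S', (x ≥ e'.1 ∧ y ≤ e'.2.1) ∧ e.2.2 ≤ e'.2.2) :
    towerQ S x y ≤ towerQ S' x y := by
  rw [towerQ_eq, towerQ_eq]
  rcases foldq_cases x y S 0 with h0 | ⟨e, he, ⟨h1, h2⟩, hv⟩
  · rw [h0]; exact foldq_ge x y S' 0
  · rw [hv]
    obtain ⟨e', he', ⟨h1', h2'⟩, hle⟩ := h e he h1 h2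
    exact le_trans hle (foldq_mem_le x y S' 0 e' he' h1' h2')

theorem towerQ_append_single (S : List (Int × Int × Int)) (n : Int × Int × Int) (x y : Int) :
    towerQ (S ++ [n]) x y = qstep x y (towerQ S x y) n := by
  rw [towerQ_eq, towerQ_eq, List.foldl_append]; rfl

-- Source B's prune-and-insert, as towerStep computes it
def pruneIns (S : List (Int × Int × Int)) (x y c : Int) : List (Int × Int × Int) :=
  if S.any (fun e => decide (e.1 ≤ x ∧ e.2.1 ≥ y ∧ e.2.2 ≥ c)) then S
  else (S.filter (fun e => decide (¬ (x ≤ e.1 ∧ y ≥ e.2.1 ∧ c ≥ e.2.2)))) ++ [(x, y, c)]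

theorem towerStep_eq (s : Int × List (Int × Int × Int)) (row : List Int) :
    towerStep s row =
      (if towerQ s.2 (PySem.List.pyGetD row 0 0) (PySem.List.pyGetD row 1 0) + 1 > s.1
         then towerQ s.2 (PySem.List.pyGetD row 0 0) (PySem.List.pyGetD row 1 0) + 1 else s.1,
       pruneIns s.2 (PySem.List.pyGetD row 0 0) (PySem.List.pyGetD row 1 0)
         (towerQ s.2 (PySem.List.pyGetD row 0 0) (PySem.List.pyGetD row 1 0) + 1)) := rfl

theorem prune_equiv (S : List (Int × Int × Int)) (x y c a b : Int) :
    towerQ (pruneIns S x y c) a b = towerQ (S ++ [(x, y, c)]) a b := by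
  unfold pruneIns; split <;> rename_i hany
  · rw [List.any_eq_true] at hany
    obtain ⟨d, hd, hdp⟩ := hany
    rw [decide_eq_true_iff] at hdp
    apply le_antisymm
    · exact towerQ_le_of_cover a b _ _ (fun e he h1 h2 =>
        ⟨e, List.mem_append_left _ he, ⟨h1, h2⟩, le_refl _⟩)
    · apply towerQ_le_of_cover
      intro e he h1 h2
      rcases List.mem_append.mp he with he | he
      · exact ⟨e, he, ⟨h1, h2⟩, le_refl _⟩
      · have hexy : e = (x, y, c) := List.mem_singleton.mp he
        subst hexy
        refine ⟨d, hd, ⟨?_, ?_⟩, ?_⟩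
        · simp only at h1 ⊢; omega
        · simp only at h2 ⊢; omega
        · simpa using hdp.2.2
  · apply le_antisymm
    · apply towerQ_le_of_cover
      intro e he h1 h2
      rcases List.mem_append.mp he with he | he
      · exact ⟨e, List.mem_append_left _ (List.mem_of_mem_filter he), ⟨h1, h2⟩, le_refl _⟩
      · exact ⟨e, List.mem_append_right _ he, ⟨h1, h2⟩, le_refl _⟩
    · apply towerQ_le_of_cover
      intro e he h1 h2
      rcases List.mem_append.mp he with he | he
      · by_cases hkeep : x ≤ e.1 ∧ y ≥ e.2.1 ∧ c ≥ e.2.2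
        · refine ⟨(x, y, c), List.mem_append_right _ (List.mem_singleton.mpr rfl),
            ⟨?_, ?_⟩, ?_⟩
          · simp only; omega
          · simp only; omega
          · simpa using hkeep.2.2
        · have hk' : e.1 < x ∨ y < e.2.1 ∨ c < e.2.2 := by
            by_contra hc
            push_neg at hc
            exact hkeep ⟨by omega, by omega, by omega⟩
          refine ⟨e, List.mem_append_left _ (List.mem_filter.mpr ⟨he, ?_⟩), ⟨h1, h2⟩, le_refl _⟩
          simpa using hk'
      · exact ⟨e, List.mem_append_right _ he, ⟨h1, h2⟩, le_refl _⟩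

-- reference (unpruned) machinery
def pvKey (r : List Int) : Int × Int := (PySem.List.pyGetD r 0 0, PySem.List.pyGetD r 1 0)

def bmax (b c : Int) : Int := if c > b then c else b

def refStepP (st : Int × List (Int × Int × Int)) (p : Int × Int) : Int × List (Int × Int × Int) :=
  (bmax st.1 (towerQ st.2 p.1 p.2 + 1), st.2 ++ [(p.1, p.2, towerQ st.2 p.1 p.2 + 1)])

def refAux (T : List (Int × Int × Int)) (P : List (Int × Int)) : List (Int × Int × Int) :=
  P.foldl (fun T p => T ++ [(p.1, p.2, towerQ T p.1 p.2 + 1)]) T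

def refT (P : List (Int × Int)) : List (Int × Int × Int) := refAux [] P

theorem refAux_cons (T : List (Int × Int × Int)) (p : Int × Int) (P : List (Int × Int)) :
    refAux T (p :: P) = refAux (T ++ [(p.1, p.2, towerQ T p.1 p.2 + 1)]) P := rfl

theorem refAux_snoc (T : List (Int × Int × Int)) (P : List (Int × Int)) (p : Int × Int) :
    refAux T (P ++ [p]) = refAux T P ++ [(p.1, p.2, towerQ (refAux T P) p.1 p.2 + 1)] := by
  unfold refAux; rw [List.foldl_append]
  rfl

theorem refAux_exists (P : List (Int × Int)) : ∀ T, ∃ R, refAux T P = T ++ R := by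
  induction P with
  | nil => exact fun T => ⟨[], (List.append_nil T).symm⟩
  | cons p P ih =>
    intro T
    obtain ⟨R, hR⟩ := ih (T ++ [(p.1, p.2, towerQ T p.1 p.2 + 1)])
    refine ⟨(p.1, p.2, towerQ T p.1 p.2 + 1) :: R, ?_⟩
    rw [refAux_cons, hR, List.append_assoc]
    rfl

theorem refAux_proj (P : List (Int × Int)) : ∀ T,
    (refAux T P).map (fun e => (e.1, e.2.1)) = T.map (fun e => (e.1, e.2.1)) ++ P := by
  induction P with
  | nil => intro T; simp [refAux]
  | cons p P ih =>
    intro T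
    rw [refAux_cons, ih]
    simp

theorem refT_length (P : List (Int × Int)) : (refT P).length = P.length := by
  have := congrArg List.length (refAux_proj P [])
  simpa using this

theorem refT_proj (P : List (Int × Int)) (m : Nat) (hm : m < P.length)
    (hm' : m < (refT P).length) :
    ((refT P)[m]'hm').1 = P[m].1 ∧ ((refT P)[m]'hm').2.1 = P[m].2 := by
  have h2 : (refT P).map (fun e => (e.1, e.2.1)) = P := by
    have h := refAux_proj P []
    simpa [refT] using h
  have h3 := congrArg (fun l => l[m]?) h2
  simp only [List.getElem?_map, List.getElem?_eq_getElem hm', List.getElem?_eq_getElem hm,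
    Option.map_some] at h3
  have h4 := Option.some.inj h3
  exact ⟨congrArg Prod.fst h4, congrArg Prod.snd h4⟩

theorem lens_pos (P : List (Int × Int)) : ∀ T, (∀ t ∈ T, 1 ≤ t.2.2) →
    ∀ e ∈ refAux T P, 1 ≤ e.2.2 := by
  induction P with
  | nil => intro T hT e he; exact hT e he
  | cons p P ih =>
    intro T hT e he
    refine ih _ ?_ e he
    intro t ht
    rcases List.mem_append.mp ht with ht | ht
    · exact hT t ht
    · have ht' : t = (p.1, p.2, towerQ T p.1 p.2 + 1) := List.mem_singleton.mp ht
      subst ht'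
      have := towerQ_nonneg T p.1 p.2
      simp only
      omega

-- B's fold equals the unpruned reference fold (frontier pruning preserves every query)
theorem B_run : ∀ (rows : List (List Int)) (best : Int) (S T : List (Int × Int × Int)),
    (∀ a b, towerQ S a b = towerQ T a b) →
    (rows.foldl towerStep (best, S)).1 = ((rows.map pvKey).foldl refStepP (best, T)).1 := by
  intro rows
  induction rows with
  | nil => intro best S T _; rfl
  | cons r rows ih =>
    intro best S T h
    have hq : towerQ S (PySem.List.pyGetD r 0 0) (PySem.List.pyGetD r 1 0) =
        towerQ T (PySem.List.pyGetD r 0 0) (PySem.List.pyGetD r 1 0) := h _ _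
    show (rows.foldl towerStep (towerStep (best, S) r)).1 =
      ((rows.map pvKey).foldl refStepP (refStepP (best, T) (pvKey r))).1
    rw [towerStep_eq]
    have hr : refStepP (best, T) (pvKey r) =
        (bmax best (towerQ T (PySem.List.pyGetD r 0 0) (PySem.List.pyGetD r 1 0) + 1),
         T ++ [(PySem.List.pyGetD r 0 0, PySem.List.pyGetD r 1 0,
                towerQ T (PySem.List.pyGetD r 0 0) (PySem.List.pyGetD r 1 0) + 1)]) := rfl
    rw [hr, ← hq]
    exact ih _ _ _ (fun a b => by
      rw [prune_equiv, towerQ_append_single, towerQ_append_single, h a b, hq])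

theorem refStep_fold_pair : ∀ (P : List (Int × Int)) (best : Int) (T : List (Int × Int × Int)),
    P.foldl refStepP (best, T) =
      ((((refAux T P).map (fun e => e.2.2)).drop T.length).foldl bmax best, refAux T P) := by
  intro P
  induction P with
  | nil =>
    intro best T
    show (best, T) = _
    have hlen : (T.map (fun e => e.2.2)).length = T.length := by simp
    rw [show refAux T ([] : List (Int × Int)) = T from rfl, ← hlen, List.drop_length]
    rfl
  | cons p P ih =>
    intro best T
    show P.foldl refStepP (refStepP (best, T) p) = _
    have hs : refStepP (best, T) p = (bmax best (towerQ T p.1 p.2 + 1),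
        T ++ [(p.1, p.2, towerQ T p.1 p.2 + 1)]) := rfl
    rw [hs, ih, refAux_cons]
    obtain ⟨R, hR⟩ := refAux_exists P (T ++ [(p.1, p.2, towerQ T p.1 p.2 + 1)])
    rw [hR]
    have e1 : List.drop (T ++ [(p.1, p.2, towerQ T p.1 p.2 + 1)]).length
        ((T ++ [(p.1, p.2, towerQ T p.1 p.2 + 1)] ++ R).map (fun e => e.2.2))
        = R.map (fun e => e.2.2) := by
      rw [List.map_append]
      exact List.drop_left' (by simp)
    have e2 : List.drop T.length
        ((T ++ [(p.1, p.2, towerQ T p.1 p.2 + 1)] ++ R).map (fun e => e.2.2))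
        = (towerQ T p.1 p.2 + 1) :: R.map (fun e => e.2.2) := by
      rw [List.append_assoc, List.map_append]
      rw [List.drop_left' (by simp)]
      simp
    rw [e1, e2]
    rfl

-- ===== A-side machinery =====
def innerA (A : List (List Int)) (i : Int) : List Int → Int → List Int := fun F j =>
  if PySem.List.pyGetD (PySem.List.pyGetD A i []) 0 0 ≥ PySem.List.pyGetD (PySem.List.pyGetD A j []) 0 0 ∧
     PySem.List.pyGetD (PySem.List.pyGetD A i []) 1 0 ≤ PySem.List.pyGetD (PySem.List.pyGetD A j []) 1 0 then
    (if PySem.List.pyGetD F j 0 + 1 > PySem.List.pyGetD F i 0 then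
      PySem.List.pySetD F i (PySem.List.pyGetD F j 0 + 1) else F)
  else F

def outerA (A : List (List Int)) (F : List Int) (i : Int) : List Int :=
  (PySem.List.pyRange 0 i 1).foldl (innerA A i) F

theorem tower_eq (A : List (List Int)) :
    tower A = (PySem.List.max?
      ((PySem.List.pyRange 1 (A.length : Int) 1).foldl (outerA A)
        ((PySem.List.pyRange 0 (A.length : Int) 1).map (fun _ => (1 : Int))))
      (fun v => v)).getD 0 := rfl

def istep (x y : Int) (q : Int) (e : Int × Int × Int) : Int :=
  if x ≥ e.1 ∧ y ≤ e.2.1 ∧ e.2.2 + 1 > q then e.2.2 + 1 else q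

theorem istep_shift (x y : Int) : ∀ (S : List (Int × Int × Int)) (q : Int),
    S.foldl (istep x y) (q + 1) = S.foldl (qstep x y) q + 1 := by
  intro S
  induction S with
  | nil => intro q; rfl
  | cons e S ih =>
    intro q
    show S.foldl (istep x y) (istep x y (q + 1) e) = S.foldl (qstep x y) (qstep x y q e) + 1
    have he : istep x y (q + 1) e = qstep x y q e + 1 := by
      unfold istep qstep; split_ifs <;> omega
    rw [he, ih]

theorem set_append_length (L : List Int) (a : Int) (r : List Int) (v : Int) :
    (L ++ a :: r).set L.length v = L ++ v :: r := by
  induction L with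
  | nil => rfl
  | cons x L ih => simpa using ih

theorem inner_inv (A : List (List Int)) (k : Nat) (hk : k < A.length) :
    ∀ (m : Nat), m ≤ k → ∀ (acc : Int) (rest : List Int),
      (PySem.List.pyRange 0 (m : Int) 1).foldl (innerA A (k : Int))
          ((refT ((A.map pvKey).take k)).map (fun e => e.2.2) ++ acc :: rest)
        = (refT ((A.map pvKey).take k)).map (fun e => e.2.2) ++
            (((refT ((A.map pvKey).take k)).take m).foldl
              (istep (pvKey (A[k])).1 (pvKey (A[k])).2) acc) :: rest := by
  set P := A.map pvKey with hP
  set Tk := refT (P.take k) with hTk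
  set Lk := Tk.map (fun e => e.2.2) with hLk
  have hPlen : P.length = A.length := by simp [hP]
  have hTklen : Tk.length = k := by
    rw [hTk, refT_length, List.length_take]
    omega
  have hLklen : Lk.length = k := by rw [hLk, List.length_map, hTklen]
  intro m
  induction m with
  | zero =>
    intro _ acc rest
    simp
  | succ m ih =>
    intro hm acc rest
    have hm' : m ≤ k := by omega
    have hmk : m < k := by omega
    have hmT : m < Tk.length := by omega
    have hcast : ((m + 1 : Nat) : Int) = (m : Int) + 1 := by push_cast; ring
    rw [hcast, PySem.List.pyRange_one_succ_right (by positivity), List.foldl_append,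
      ih hm', List.foldl_cons, List.foldl_nil]
    -- read facts
    have hrowk : PySem.List.pyGetD A (k : Int) [] = A[k] := by
      rw [PySem.List.pyGetD_natCast, List.getD_eq_getElem?_getD,
        List.getElem?_eq_getElem hk, Option.getD_some]
    have hrowm : PySem.List.pyGetD A (m : Int) [] = A[m]'(by omega) := by
      rw [PySem.List.pyGetD_natCast, List.getD_eq_getElem?_getD,
        List.getElem?_eq_getElem (by omega : m < A.length), Option.getD_some]
    set q' := ((Tk.take m).foldl (istep (pvKey (A[k])).1 (pvKey (A[k])).2) acc) with hq'
    have hreadm : PySem.List.pyGetD (Lk ++ q' :: rest) (m : Int) 0 = (Tk[m]'hmT).2.2 := by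
      rw [PySem.List.pyGetD_natCast, List.getD_eq_getElem?_getD,
        List.getElem?_append_left (by omega : m < Lk.length),
        List.getElem?_eq_getElem (by omega : m < Lk.length), Option.getD_some]
      simp [hLk]
    have hreadk : PySem.List.pyGetD (Lk ++ q' :: rest) (k : Int) 0 = q' := by
      rw [PySem.List.pyGetD_natCast, List.getD_eq_getElem?_getD,
        List.getElem?_append_right (by omega : Lk.length ≤ k)]
      rw [show k - Lk.length = 0 by omega]
      rfl
    have hgetmP : P[m]'(by omega) = pvKey (A[m]'(by omega)) := by
      simp [hP]
    have htakem : (P.take k)[m]'(by rw [List.length_take]; omega) = P[m]'(by omega) :=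
      List.getElem_take
    have hproj := refT_proj (P.take k) m (by rw [List.length_take]; omega)
      (by rw [← hTk]; omega)
    rw [htakem, hgetmP] at hproj
    have hproj1 : (Tk[m]'hmT).1 = (pvKey (A[m]'(by omega))).1 := hproj.1
    have hproj2 : (Tk[m]'hmT).2.1 = (pvKey (A[m]'(by omega))).2 := hproj.2
    have hcondx : PySem.List.pyGetD (A[m]'(by omega)) 0 0 = (Tk[m]'hmT).1 := by
      rw [hproj1]; rfl
    have hcondy : PySem.List.pyGetD (A[m]'(by omega)) 1 0 = (Tk[m]'hmT).2.1 := by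
      rw [hproj2]; rfl
    have hxk : PySem.List.pyGetD (A[k]) 0 0 = (pvKey (A[k])).1 := rfl
    have hyk : PySem.List.pyGetD (A[k]) 1 0 = (pvKey (A[k])).2 := rfl
    have hset : (Lk ++ q' :: rest).set k ((Tk[m]'hmT).2.2 + 1)
        = Lk ++ ((Tk[m]'hmT).2.2 + 1) :: rest := by
      rw [show k = Lk.length by omega]
      exact set_append_length _ _ _ _
    have htake : Tk.take (m + 1) = Tk.take m ++ [Tk[m]'hmT] := by
      rw [List.take_succ, List.getElem?_eq_getElem hmT]
      rfl
    rw [htake, List.foldl_append, List.foldl_cons, List.foldl_nil, ← hq']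
    show innerA A (k : Int) (Lk ++ q' :: rest) (m : Int) = _
    unfold innerA
    simp only [hrowk, hrowm, hreadm, hreadk, hxk, hyk, hcondx, hcondy,
      PySem.List.pySetD_natCast, hset]
    unfold istep
    split_ifs <;> first | rfl | omega

theorem outer_inv (A : List (List Int)) (hA : A ≠ []) : ∀ (k : Nat), 1 ≤ k → k ≤ A.length →
    (PySem.List.pyRange 1 (k : Int) 1).foldl (outerA A) (List.replicate A.length (1 : Int))
      = (refT ((A.map pvKey).take k)).map (fun e => e.2.2) ++
          List.replicate (A.length - k) 1 := by
  intro k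
  induction k with
  | zero => omega
  | succ k ih =>
    intro _ hk1
    by_cases hk0 : k = 0
    · subst hk0
      obtain ⟨a0, A', rfl⟩ := List.exists_cons_of_ne_nil hA
      rw [show ((0 + 1 : Nat) : Int) = 1 by norm_num, PySem.List.pyRange_one_eq_nil (le_refl 1),
        List.foldl_nil]
      rw [show (a0 :: A').map pvKey = pvKey a0 :: A'.map pvKey from rfl]
      rw [show (pvKey a0 :: A'.map pvKey).take 1 = [pvKey a0] by simp]
      rw [show refT [pvKey a0] = [((pvKey a0).1, (pvKey a0).2, 1)] from rfl]
      simp [List.replicate_succ]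
    · have hk : 1 ≤ k := by omega
      have hklen : k < A.length := by omega
      have hcast : ((k + 1 : Nat) : Int) = (k : Int) + 1 := by push_cast; ring
      rw [hcast, PySem.List.pyRange_one_succ_right (by exact_mod_cast hk), List.foldl_append,
        ih hk (by omega), List.foldl_cons, List.foldl_nil]
      rw [show A.length - k = (A.length - (k + 1)) + 1 by omega, List.replicate_succ]
      show outerA A ((refT ((A.map pvKey).take k)).map (fun e => e.2.2) ++
          (1 : Int) :: List.replicate (A.length - (k + 1)) 1) (k : Int) = _
      unfold outerA
      rw [inner_inv A k hklen k (le_refl k) 1 (List.replicate (A.length - (k + 1)) 1)]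
      -- simplify the computed head value
      have htakeTk : (refT ((A.map pvKey).take k)).take k = refT ((A.map pvKey).take k) := by
        apply List.take_of_length_le
        rw [refT_length, List.length_take]
        omega
      have hfold : (refT ((A.map pvKey).take k)).foldl
          (istep (pvKey (A[k]'hklen)).1 (pvKey (A[k]'hklen)).2) 1
          = towerQ (refT ((A.map pvKey).take k)) (pvKey (A[k]'hklen)).1 (pvKey (A[k]'hklen)).2 + 1 := by
        rw [show (1 : Int) = 0 + 1 by ring, istep_shift, towerQ_eq]
        omega
      rw [htakeTk, hfold]
      -- rewrite the RHS prefix: take (k+1) = take k ++ [P[k]]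
      have hPk : k < (A.map pvKey).length := by simpa using hklen
      have htakeP : (A.map pvKey).take (k + 1)
          = (A.map pvKey).take k ++ [pvKey (A[k]'hklen)] := by
        rw [List.take_succ, List.getElem?_eq_getElem hPk]
        rw [show (A.map pvKey)[k]'hPk = pvKey (A[k]'hklen) from List.getElem_map _]
        rfl
      rw [htakeP, show refT ((A.map pvKey).take k ++ [pvKey (A[k]'hklen)])
          = refAux [] ((A.map pvKey).take k ++ [pvKey (A[k]'hklen)]) from rfl,
        refAux_snoc]
      simp [refT]

theorem bmax_eq_max : bmax = fun b c => max b c := by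
  funext b c
  unfold bmax
  split <;> rename_i h
  · exact (max_eq_right (by omega)).symm
  · exact (max_eq_left (by omega)).symm

theorem final_max (L : List Int) (hL : L ≠ []) (hpos : ∀ v ∈ L, 1 ≤ v) :
    (PySem.List.max? L (fun v => v)).getD 0 = L.foldl bmax 0 := by
  cases L with
  | nil => exact absurd rfl hL
  | cons a t =>
    rw [PySem.List.max?_id_cons, Option.getD_some]
    show t.foldl max a = (a :: t).foldl bmax 0
    rw [bmax_eq_max]
    show t.foldl max a = t.foldl max (max 0 a)
    have ha : 1 ≤ a := hpos a List.mem_cons_self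
    rw [max_eq_right (by omega)]

theorem tower_eq_alt (A : List (List Int)) : tower A = tower_alt A := by
  rcases List.eq_nil_or_concat' A with rfl | _
  · rfl
  · have hA : A ≠ [] := by
      rintro rfl
      simp_all
    have hlen : 1 ≤ A.length := List.length_pos_iff.mpr hA
    -- initial F is replicate n 1
    have hF0 : (PySem.List.pyRange 0 (A.length : Int) 1).map (fun _ => (1 : Int))
        = List.replicate A.length (1 : Int) := by
      rw [List.map_const']
      congr 1
      rw [PySem.List.length_pyRange_one]
      simp
    -- the final DP array
    have htakeP : (A.map pvKey).take A.length = A.map pvKey :=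
      List.take_of_length_le (by simp)
    have houter := outer_inv A hA A.length hlen (le_refl _)
    rw [htakeP, Nat.sub_self, List.replicate_zero, List.append_nil] at houter
    have hF1 : tower A = (PySem.List.max?
        ((refT (A.map pvKey)).map (fun e => e.2.2)) (fun v => v)).getD 0 := by
      rw [tower_eq, hF0, houter]
    -- A's result via final_max
    have hne : (refT (A.map pvKey)).map (fun e => e.2.2) ≠ [] := by
      intro h
      have := congrArg List.length h
      rw [List.length_map, refT_length] at this
      simp at this
      exact hA this
    have hpos : ∀ v ∈ (refT (A.map pvKey)).map (fun e => e.2.2), 1 ≤ v := by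
      intro v hv
      obtain ⟨e, he, rfl⟩ := List.mem_map.mp hv
      exact lens_pos (A.map pvKey) [] (by intro t ht; cases ht) e he
    rw [hF1, final_max _ hne hpos]
    -- B's result
    show _ = (A.foldl towerStep (0, [])).1
    rw [B_run A 0 [] [] (fun a b => rfl), refStep_fold_pair]
    simp [refT]

-- ===== VERDICT (by name: the statement is the Claim_ definition above) =====
theorem tower_spec : Claim_equal_tower := by
  intro A _ _
  exact tower_eq_alt A
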